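-- pv_equiv track=rewrite | github.com/davoshack/elements-of-programming-interviews | src/1-primitive-types/parity.py | better_parity
-- ===== SOURCE A (Python) =====
-- def better_parity(x: int) -> int:
--     result = 0
--     count = 0
--     while x:
--         result ^= 1
--         x &= x - 1
--         count += 1
--     return result
-- ===== SOURCE B (Python) =====
-- def better_parity(x: int) -> int:
--     result = 0
--     while x:
--         result ^= x & 1
--         x >>= 1
--     return result
-- ===== Notes on version B (the rewrite author's own statement) =====
-- stated objective: alternative
-- what changed: Replaces the Brian-Kernighan clear-lowest-set-bit loop (x &= x-1, toggling result once per set bit) with a bit-by-bit scan that shifts x right one position at a time and XORs each low bit into the result, and drops the dead count variable.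
import Mathlib
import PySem

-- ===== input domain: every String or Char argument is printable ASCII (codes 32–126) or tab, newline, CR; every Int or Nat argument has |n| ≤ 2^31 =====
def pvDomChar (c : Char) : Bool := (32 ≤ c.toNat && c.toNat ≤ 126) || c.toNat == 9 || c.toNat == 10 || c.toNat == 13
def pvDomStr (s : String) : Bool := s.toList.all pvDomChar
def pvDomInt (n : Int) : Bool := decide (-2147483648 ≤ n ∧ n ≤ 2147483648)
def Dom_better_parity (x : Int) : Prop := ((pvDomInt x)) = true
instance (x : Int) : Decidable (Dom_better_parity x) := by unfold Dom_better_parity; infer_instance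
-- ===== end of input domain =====

-- B replaces A's Brian-Kernighan clear-lowest-set-bit loop by a bit-by-bit right-shift scan
-- (alternative decomposition, no speed claim). On x < 0 neither Python ever returns (both
-- while-loops diverge), so no return value is claimed there; both ports read x.toNat and are
-- exact wherever the Pythons return (x ≥ 0).

-- termination helper for port A's loop (cited by decreasing_by)
theorem pv_land_pred_lt (n : Nat) (h : ¬ n = 0) : n &&& (n - 1) < n :=
  Nat.lt_of_le_of_lt Nat.and_le_right (by omega)

-- ===== PORT A =====
-- while x: result ^= 1; x &= x - 1   (count is dead state, dropped from the port's result;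
-- exact for x ≥ 0; on x < 0 the Python loops forever, so nothing is claimed there)
def parityLoopA (n : Nat) (result : Int) : Int :=
  if h : n = 0 then result
  else parityLoopA (n &&& (n - 1)) (Int.xor result 1)
termination_by n
decreasing_by exact pv_land_pred_lt n h

def better_parity (x : Int) : Int := parityLoopA x.toNat 0

-- ===== PORT B =====
-- while x: result ^= x & 1; x >>= 1   (exact for x ≥ 0; the Python diverges on x < 0)
def parityLoopB (n : Nat) (result : Int) : Int :=
  if h : n = 0 then result
  else parityLoopB (n >>> 1) (Int.xor result ((n % 2 : Nat) : Int))
termination_by n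
decreasing_by simp [Nat.shiftRight_one]; omega

def better_parity_alt (x : Int) : Int := parityLoopB x.toNat 0

-- ===== PRECONDITION & SPEC =====
def Spec_better_parity (x : Int) (out : Int) : Prop := out = better_parity_alt x
instance (x : Int) (out : Int) : Decidable (Spec_better_parity x out) := by unfold Spec_better_parity; infer_instance

-- ===== CLAIM (what is proved, stated in full; the proofs are below) =====
def Claim_equal_better_parity : Prop := ∀ (x : Int), Dom_better_parity x → Spec_better_parity x (better_parity x)

-- ===== LEMMAS AND PROOFS =====

theorem int_xor_zero (r : Int) : Int.xor r 0 = r := by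
  cases r <;> simp [Int.xor]

-- clearing behaviour of n &&& (n-1), odd case: it is just n - 1
theorem land_pred_odd (n : Nat) (h : n % 2 = 1) : n &&& (n - 1) = n - 1 := by
  apply Nat.eq_of_testBit_eq
  intro i
  rw [Nat.testBit_land]
  cases i with
  | zero =>
      simp [Nat.testBit_zero, h]
  | succ i =>
      simp only [Nat.testBit_add_one]
      have e : (n - 1) / 2 = n / 2 := by omega
      rw [e, Bool.and_self]

-- even case: the cleared value is twice the cleared value of n / 2
theorem land_pred_even (n : Nat) (h : n % 2 = 0) :
    n &&& (n - 1) = 2 * ((n / 2) &&& (n / 2 - 1)) := by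
  apply Nat.eq_of_testBit_eq
  intro i
  rw [Nat.testBit_land]
  cases i with
  | zero =>
      rw [Nat.testBit_zero]
      have h1 : ¬ n % 2 = 1 := by omega
      have h2 : (2 * (n / 2 &&& (n / 2 - 1))) % 2 = 0 := by omega
      simp [h1, h2]
  | succ i =>
      simp only [Nat.testBit_add_one]
      have e1 : (n - 1) / 2 = n / 2 - 1 := by omega
      have e2 : 2 * (n / 2 &&& (n / 2 - 1)) / 2 = n / 2 &&& (n / 2 - 1) := by omega
      rw [e1, e2, Nat.testBit_land]

-- B's loop ignores an even input's low zero bit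
theorem loopB_even (j : Nat) (r : Int) : parityLoopB (2 * j) r = parityLoopB j r := by
  by_cases hj : j = 0
  · simp [hj]
  · rw [parityLoopB]
    have h2 : ¬ 2 * j = 0 := by omega
    have e1 : (2 * j) >>> 1 = j := by rw [Nat.shiftRight_one]; omega
    have e2 : (2 * j) % 2 = 0 := by omega
    simp only [h2, dite_false, e1, e2, Nat.cast_zero, int_xor_zero]

-- the two loops agree for every start state
theorem loop_eq (n : Nat) : ∀ r : Int, parityLoopA n r = parityLoopB n r := by
  induction n using Nat.strong_induction_on with
  | _ n ih =>
    intro r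
    by_cases h0 : n = 0
    · rw [parityLoopA, parityLoopB]; simp [h0]
    rcases Nat.mod_two_eq_zero_or_one n with hpar | hpar
    · -- n even, n ≠ 0
      have hk : n / 2 ≠ 0 := by omega
      have hklt : n / 2 < n := by omega
      have hjlt : n / 2 &&& (n / 2 - 1) < n / 2 := pv_land_pred_lt (n / 2) hk
      calc parityLoopA n r
          = parityLoopA (2 * (n / 2 &&& (n / 2 - 1))) (Int.xor r 1) := by
              rw [parityLoopA]; simp only [h0, dite_false, land_pred_even n hpar]
        _ = parityLoopB (2 * (n / 2 &&& (n / 2 - 1))) (Int.xor r 1) := by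
              exact ih _ (by omega) _
        _ = parityLoopB (n / 2 &&& (n / 2 - 1)) (Int.xor r 1) := loopB_even _ _
        _ = parityLoopA (n / 2 &&& (n / 2 - 1)) (Int.xor r 1) := (ih _ (by omega) _).symm
        _ = parityLoopA (n / 2) r := by
              conv_rhs => rw [parityLoopA]
              simp only [hk, dite_false]
        _ = parityLoopB (n / 2) r := ih _ hklt _
        _ = parityLoopB n r := by
              conv_rhs => rw [parityLoopB]
              have e1 : n >>> 1 = n / 2 := Nat.shiftRight_one n
              simp only [h0, dite_false, e1, hpar, Nat.cast_zero, int_xor_zero]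
    · -- n odd
      have e2 : (n - 1) / 2 = n / 2 := by omega
      calc parityLoopA n r
          = parityLoopA (n - 1) (Int.xor r 1) := by
              rw [parityLoopA]; simp only [h0, dite_false, land_pred_odd n hpar]
        _ = parityLoopB (n - 1) (Int.xor r 1) := ih _ (by omega) _
        _ = parityLoopB (2 * (n / 2)) (Int.xor r 1) := by
              have : n - 1 = 2 * (n / 2) := by omega
              rw [this]
        _ = parityLoopB (n / 2) (Int.xor r 1) := loopB_even _ _
        _ = parityLoopB n r := by
              conv_rhs => rw [parityLoopB]
              have e1 : n >>> 1 = n / 2 := Nat.shiftRight_one n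
              simp only [h0, dite_false, e1, hpar, Nat.cast_one]

-- ===== VERDICT (by name: the statement is the Claim_ definition above) =====
theorem better_parity_spec : Claim_equal_better_parity := by
  intro x _
  show better_parity x = better_parity_alt x
  unfold better_parity better_parity_alt
  exact loop_eq x.toNat 0
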